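-- pv_equiv track=rewrite | github.com/sophiaLichtenberg/AnalyzingAndVisualizingInPython | project/skyscanner.py | solve
-- ===== SOURCE A (Python) =====
-- def solve(input):
--     blacks = {}
--     whites = {}
--     black = True
--     black_start = True
--     row_size = 0
--     # First we count how many of each there are
--     for row in input:
--         row_size = len(row)
--         black = black_start
--         for char in row:
--             if black:
--                 blacks[char] = blacks.get(char, 0) + 1
--             else:
--                 whites[char] = whites.get(char, 0) + 1
--             black = not black
--         black_start = not black_start
--     black_max_1 = {}
--     black_max_2 = {}
--     white_max_1 = {}
--     white_max_2 = {}
--     # Now we get the maximums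
--     for key, value in blacks.items():
--         if value > black_max_1.get("value", -1):
--             black_max_2 = black_max_1
--             black_max_1 = {
--                 "key": key,
--                 "value": value,
--             }
--         elif value > black_max_2.get("value", -1):
--             black_max_2 = {
--                 "key": key,
--                 "value": value,
--             }
--     for key, value in whites.items():
--         if value > white_max_1.get("value", -1):
--             white_max_2 = white_max_1
--             white_max_1 = {
--                 "key": key,
--                 "value": value,
--             }
--         elif value > white_max_2.get("value", -1):
--             white_max_2 = {
--                 "key": key,
--                 "value": value,
--             }
--     total = row_size * row_size
--
--     if white_max_1["key"] != black_max_1["key"]: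
--         return total - (white_max_1["value"] + black_max_1["value"])
--     elif white_max_2.get("value", -1) > black_max_2.get("value", -1):
--         return total - (white_max_2["value"] + black_max_1["value"])
--     return total - (white_max_1["value"] + black_max_2.get("value", 0))
-- ===== SOURCE B (Python) =====
-- def solve(input):
--     # Flatten the board into (colour, char) cells by index parity, group each
--     # colour's cell positions by char (first-occurrence order), rank the chars by
--     # a stable descending sort on group size and keep the top two.
--     cells = [((i + j) % 2, ch) for i, row in enumerate(input) for j, ch in enumerate(row)]
--     row_size = len(input[-1]) if input else 0
--
--     def ranking(par):
--         grp = [ch for p, ch in cells if p == par]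
--         groups = {}
--         for k, ch in enumerate(grp):
--             groups.setdefault(ch, []).append(k)
--         stats = [(c, len(ix)) for c, ix in groups.items()]
--         return sorted(stats, key=lambda kv: -kv[1])[:2]
--
--     btop = ranking(0)
--     wtop = ranking(1)
--     total = row_size * row_size
--     (bk1, bv1) = btop[0]   # IndexError when a colour has no cells (A raises KeyError there)
--     (wk1, wv1) = wtop[0]
--     if wk1 != bk1:
--         return total - (wv1 + bv1)
--     bv2 = btop[1][1] if len(btop) > 1 else -1
--     wv2 = wtop[1][1] if len(wtop) > 1 else -1
--     if wv2 > bv2: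
--         return total - (wv2 + bv1)
--     return total - (wv1 + (bv2 if len(btop) > 1 else 0))
-- ===== Notes on version B (the rewrite author's own statement) =====
-- stated objective: alternative
-- what changed: B replaces A's nested toggle loops feeding two hash counters and A's two running best-two scans with sentinel dicts by a flatten/group/rank pipeline: it flattens the board into (parity, char) cells in one comprehension, groups each colour's cell positions by char (group size = count), and takes the top two of a stable descending sort instead of the running two-maximum scan.
import Mathlib
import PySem

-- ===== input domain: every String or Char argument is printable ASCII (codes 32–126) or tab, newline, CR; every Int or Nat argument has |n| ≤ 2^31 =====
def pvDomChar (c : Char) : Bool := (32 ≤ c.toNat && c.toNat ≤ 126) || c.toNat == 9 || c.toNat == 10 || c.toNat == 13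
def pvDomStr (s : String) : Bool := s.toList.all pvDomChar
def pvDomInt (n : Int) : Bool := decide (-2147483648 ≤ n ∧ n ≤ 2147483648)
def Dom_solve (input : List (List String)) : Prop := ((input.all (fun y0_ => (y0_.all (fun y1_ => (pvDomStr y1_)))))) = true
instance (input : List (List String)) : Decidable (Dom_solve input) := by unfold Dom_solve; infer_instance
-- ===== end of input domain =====

-- B replaces A's nested toggle loops feeding two hash counters plus two running best-two scans
-- by a flatten/group/rank pipeline: flatten to (parity, char) cells, group each colour's cell
-- positions by char, take the top two of a stable descending sort on group size (alternative).

-- ===== PORT A =====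
-- inner loop body: state (blacks, whites, black); 'blacks[char] = blacks.get(char, 0) + 1'
-- (resp. whites), then 'black = not black'
def stepCellA (t : PySem.Dict String Int × PySem.Dict String Int × Bool) (ch : String) :
    PySem.Dict String Int × PySem.Dict String Int × Bool :=
  if t.2.2 then (t.1.insert ch (t.1.getD ch 0 + 1), t.2.1, !t.2.2)
  else (t.1, t.2.1.insert ch (t.2.1.getD ch 0 + 1), !t.2.2)

-- outer loop body: state (blacks, whites, black_start, row_size)
def stepRowA (s : PySem.Dict String Int × PySem.Dict String Int × Bool × Int) (row : List String) :
    PySem.Dict String Int × PySem.Dict String Int × Bool × Int :=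
  let inner := row.foldl stepCellA (s.1, s.2.1, s.2.2.1)
  (inner.1, inner.2.1, !s.2.2.1, (row.length : Int))

-- A's max-1/max-2 scan.  The Python records {} / {"key": k, "value": v} are ported as
-- Option (String × Int): {} ↔ none, .get("value", d) ↔ (o.map Prod.snd).getD d (exact:
-- those dicts only ever hold exactly the keys "key" and "value").
def solveScan (items : List (String × Int)) : Option (String × Int) × Option (String × Int) :=
  items.foldl
    (fun m kv =>
      if (m.1.map Prod.snd).getD (-1) < kv.2 then (some kv, m.1)
      else if (m.2.map Prod.snd).getD (-1) < kv.2 then (m.1, some kv)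
      else m)
    (none, none)

def solve (input : List (List String)) : Int :=
  let c := input.foldl stepRowA (PySem.Dict.empty, PySem.Dict.empty, true, 0)
  let bm := solveScan c.1.items
  let wm := solveScan c.2.1.items
  let total := c.2.2.2 * c.2.2.2
  match wm.1, bm.1 with
  | some w1, some b1 =>
    if w1.1 ≠ b1.1 then total - (w1.2 + b1.2)
    else if (bm.2.map Prod.snd).getD (-1) < (wm.2.map Prod.snd).getD (-1) then
      -- white_max_2["value"]: the guard just ensured white_max_2 is non-empty, so getD (-1) is its value
      total - ((wm.2.map Prod.snd).getD (-1) + b1.2)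
    else total - (w1.2 + (bm.2.map Prod.snd).getD 0)
  | _, _ => 0  -- Python raises KeyError here (a colour has no cells); excluded by Pre_solve

-- ===== PORT B =====
-- cells = [((i + j) % 2, ch) for i, row in enumerate(input) for j, ch in enumerate(row)]
def cellsB (input : List (List String)) : List (Int × String) :=
  (PySem.List.enumerate input).flatMap (fun p =>
    (PySem.List.enumerate p.2).map (fun q => (PySem.Int.mod (p.1 + q.1) 2, q.2)))

-- ranking(par): grp; groups.setdefault(ch, []).append(k) — ported as insert of getD ++ [k],
-- exact: setdefault puts a fresh key at the end, the in-place append keeps its position —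
-- then stats from groups.items, sorted(...)[:2] (= take 2)
def rankingB (cells : List (Int × String)) (par : Int) : List (String × Int) :=
  let grp := (cells.filter (fun c => c.1 == par)).map (fun c => c.2)
  let groups := (PySem.List.enumerate grp).foldl
      (fun d q => d.insert q.2 (d.getD q.2 [] ++ [q.1])) PySem.Dict.empty
  let stats := groups.items.map (fun ci => (ci.1, (ci.2.length : Int)))
  (PySem.List.sorted stats (fun kv => -kv.2) false).take 2

def solve_alt (input : List (List String)) : Int :=
  let cells := cellsB input
  -- row_size = len(input[-1]) if input else 0 (the 'none' arm is unreachable: input ≠ [])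
  let rowSize : Int :=
    if input.isEmpty then 0
    else match PySem.List.pyGet? input (-1) with
         | some r => (r.length : Int)
         | none => 0
  match rankingB cells 0, rankingB cells 1 with
  | (bk1, bv1) :: btail, (wk1, wv1) :: wtail =>
    let total := rowSize * rowSize
    if wk1 ≠ bk1 then total - (wv1 + bv1)
    else
      let bv2 : Int := match btail with | (_, v) :: _ => v | [] => -1
      let wv2 : Int := match wtail with | (_, v) :: _ => v | [] => -1
      if bv2 < wv2 then total - (wv2 + bv1)
      else total - (wv1 + (match btail with | (_, v) :: _ => v | [] => 0))
  | _, _ => 0  -- Python raises IndexError here (a colour has no cells); excluded by Pre_solve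

-- ===== PRECONDITION & SPEC =====
-- Pre_solve excludes boards on which one chessboard colour has no cells at all: there A
-- raises KeyError (its max-dicts stay {}) and B raises IndexError (top-2 list is empty).
def Pre_solve (input : List (List String)) : Prop :=
  (PySem.List.enumerate input).any
      (fun p => (PySem.List.enumerate p.2).any (fun q => PySem.Int.mod (p.1 + q.1) 2 == 0)) = true ∧
  (PySem.List.enumerate input).any
      (fun p => (PySem.List.enumerate p.2).any (fun q => !(PySem.Int.mod (p.1 + q.1) 2 == 0))) = true

instance (input : List (List String)) : Decidable (Pre_solve input) := by
  unfold Pre_solve; infer_instance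

def pvWitness_solve : List (List String) := [["a", "b"]]

def Spec_solve (input : List (List String)) (out : Int) : Prop := out = solve_alt input
instance (input : List (List String)) (out : Int) : Decidable (Spec_solve input out) := by unfold Spec_solve; infer_instance

-- ===== CLAIM (what is proved, stated in full; the proofs are below) =====
def Claim_equal_solve : Prop := ∀ (input : List (List String)), Dom_solve input → Pre_solve input → Spec_solve input (solve input)

-- ===== LEMMAS AND PROOFS =====

-- ---- proof-layer state machines ----
-- one cell with explicit parity
def stepPar (bw : PySem.Dict String Int × PySem.Dict String Int) (c : Int × String) :
    PySem.Dict String Int × PySem.Dict String Int :=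
  if c.1 == 0 then (bw.1.insert c.2 (bw.1.getD c.2 0 + 1), bw.2)
  else (bw.1, bw.2.insert c.2 (bw.2.getD c.2 0 + 1))

def stepCellM (i : Int) (bw : PySem.Dict String Int × PySem.Dict String Int) (q : Int × String) :
    PySem.Dict String Int × PySem.Dict String Int :=
  stepPar bw (PySem.Int.mod (i + q.1) 2, q.2)

def stepRowM (s : PySem.Dict String Int × PySem.Dict String Int × Int) (p : Int × List String) :
    PySem.Dict String Int × PySem.Dict String Int × Int :=
  let inner := (PySem.List.enumerate p.2).foldl (stepCellM p.1) (s.1, s.2.1)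
  (inner.1, inner.2, (p.2.length : Int))

def cellsAt (l : List (Int × List String)) : List (Int × String) :=
  l.flatMap (fun p => (PySem.List.enumerate p.2).map (fun q => (PySem.Int.mod (p.1 + q.1) 2, q.2)))

def optList (m : Option (String × Int) × Option (String × Int)) : List (String × Int) :=
  match m with
  | (some a, some b) => [a, b]
  | (some a, none) => [a]
  | (none, _) => []

def statsOf (g : List String) : List (String × Int) :=
  (PySem.Set.ofList g).map (fun c => (c, (g.count c : Int)))

lemma parity_flip (n : Int) : (PySem.Int.mod (n + 1) 2 == 0) = !(PySem.Int.mod n 2 == 0) := by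
  rw [PySem.Int.mod_eq_emod_of_pos (by norm_num), PySem.Int.mod_eq_emod_of_pos (by norm_num)]
  by_cases h : n % 2 = 0
  · have h1 : (n + 1) % 2 = 1 := by omega
    simp [h, h1]
  · have h0 : n % 2 = 1 := by omega
    have h1 : (n + 1) % 2 = 0 := by omega
    simp [h0, h1]

lemma innerAM (i : Int) : ∀ (row : List String) (j : Int) (b w : PySem.Dict String Int),
    row.foldl stepCellA (b, w, (PySem.Int.mod (i + j) 2 == 0)) =
      (((PySem.List.enumerate row j).foldl (stepCellM i) (b, w)).1,
       ((PySem.List.enumerate row j).foldl (stepCellM i) (b, w)).2,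
       (PySem.Int.mod (i + j + row.length) 2 == 0)) := by
  intro row
  induction row with
  | nil => intro j b w; simp [PySem.List.enumerate_nil]
  | cons ch t ih =>
    intro j b w
    rw [PySem.List.enumerate_cons]
    simp only [List.foldl_cons]
    have hlen : i + (j + 1) + (t.length : Int) = i + j + ((ch :: t).length : Int) := by
      simp; ring
    have hflip : (PySem.Int.mod (i + (j + 1)) 2 == 0) = !(PySem.Int.mod (i + j) 2 == 0) := by
      rw [show i + (j + 1) = (i + j) + 1 by ring, parity_flip]
    cases h : (PySem.Int.mod (i + j) 2 == 0) with
    | true =>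
      have hA : stepCellA (b, w, true) ch
          = (b.insert ch (b.getD ch 0 + 1), w, PySem.Int.mod (i + (j + 1)) 2 == 0) := by
        simp only [stepCellA, hflip, h]; rfl
      have hB : stepCellM i (b, w) (j, ch) = (b.insert ch (b.getD ch 0 + 1), w) := by
        simp only [stepCellM, stepPar, h]; rfl
      rw [hA, hB, ih (j + 1), hlen]
    | false =>
      have hA : stepCellA (b, w, false) ch
          = (b, w.insert ch (w.getD ch 0 + 1), PySem.Int.mod (i + (j + 1)) 2 == 0) := by
        simp only [stepCellA, hflip, h]; rfl
      have hB : stepCellM i (b, w) (j, ch) = (b, w.insert ch (w.getD ch 0 + 1)) := by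
        simp only [stepCellM, stepPar, h]; rfl
      rw [hA, hB, ih (j + 1), hlen]

lemma outerAM : ∀ (rows : List (List String)) (i : Int) (b w : PySem.Dict String Int) (sz : Int),
    rows.foldl stepRowA (b, w, (PySem.Int.mod i 2 == 0), sz) =
      (((PySem.List.enumerate rows i).foldl stepRowM (b, w, sz)).1,
       ((PySem.List.enumerate rows i).foldl stepRowM (b, w, sz)).2.1,
       (PySem.Int.mod (i + rows.length) 2 == 0),
       ((PySem.List.enumerate rows i).foldl stepRowM (b, w, sz)).2.2) := by
  intro rows
  induction rows with
  | nil => intro i b w sz; simp [PySem.List.enumerate_nil]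
  | cons row t ih =>
    intro i b w sz
    rw [PySem.List.enumerate_cons]
    simp only [List.foldl_cons]
    have hin := innerAM i row 0 b w
    rw [add_zero] at hin
    have hA : stepRowA (b, w, (PySem.Int.mod i 2 == 0), sz) row
        = (((PySem.List.enumerate row 0).foldl (stepCellM i) (b, w)).1,
           ((PySem.List.enumerate row 0).foldl (stepCellM i) (b, w)).2,
           (PySem.Int.mod (i + 1) 2 == 0), (row.length : Int)) := by
      simp only [stepRowA, hin, parity_flip]
    have hB : stepRowM (b, w, sz) (i, row)
        = (((PySem.List.enumerate row 0).foldl (stepCellM i) (b, w)).1,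
           ((PySem.List.enumerate row 0).foldl (stepCellM i) (b, w)).2,
           (row.length : Int)) := by
      simp only [stepRowM]
    rw [hA, hB, ih (i + 1)]
    have hlen : i + 1 + (t.length : Int) = i + ((row :: t).length : Int) := by simp; ring
    rw [hlen]

-- the row-machine fold over enumerated rows IS the cell fold over the flattened cells
lemma foldRowM_eq_cells : ∀ (l : List (Int × List String))
    (b w : PySem.Dict String Int) (sz : Int),
    l.foldl stepRowM (b, w, sz) =
      (((cellsAt l).foldl stepPar (b, w)).1, ((cellsAt l).foldl stepPar (b, w)).2,
       l.foldl (fun _ p => (p.2.length : Int)) sz) := by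
  intro l
  induction l with
  | nil => intro b w sz; simp [cellsAt]
  | cons p t ih =>
    intro b w sz
    have hcells : cellsAt (p :: t)
        = ((PySem.List.enumerate p.2).map (fun q => (PySem.Int.mod (p.1 + q.1) 2, q.2)))
            ++ cellsAt t := by
      simp [cellsAt]
    rw [hcells]
    simp only [List.foldl_cons, List.foldl_append, List.foldl_map]
    have hmap : ∀ bw : PySem.Dict String Int × PySem.Dict String Int,
        (PySem.List.enumerate p.2).foldl
            (fun acc q => stepPar acc (PySem.Int.mod (p.1 + q.1) 2, q.2)) bw
          = (PySem.List.enumerate p.2).foldl (stepCellM p.1) bw := by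
      intro bw; rfl
    rw [hmap]
    have hstep : stepRowM (b, w, sz) p
        = (((PySem.List.enumerate p.2).foldl (stepCellM p.1) (b, w)).1,
           ((PySem.List.enumerate p.2).foldl (stepCellM p.1) (b, w)).2,
           (p.2.length : Int)) := by
      simp only [stepRowM]
    rw [hstep, ih]

-- the interleaved two-dict cell fold splits into two counter folds over the filtered streams
lemma splitPar : ∀ (cs : List (Int × String)) (b w : PySem.Dict String Int),
    cs.foldl stepPar (b, w) =
      (((cs.filter (fun c => c.1 == 0)).map (fun c => c.2)).foldl
          (fun d x => d.insert x (d.getD x 0 + 1)) b,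
       ((cs.filter (fun c => !(c.1 == 0))).map (fun c => c.2)).foldl
          (fun d x => d.insert x (d.getD x 0 + 1)) w) := by
  intro cs
  induction cs with
  | nil => intro b w; rfl
  | cons c t ih =>
    intro b w
    cases h : (c.1 == (0 : Int)) with
    | true =>
      have hs : stepPar (b, w) c = (b.insert c.2 (b.getD c.2 0 + 1), w) := by
        simp only [stepPar, h]; rfl
      simp only [List.foldl_cons, hs, List.filter_cons, h, Bool.not_true, List.map_cons,
        List.foldl_cons, ih]
      rfl
    | false =>
      have hs : stepPar (b, w) c = (b, w.insert c.2 (w.getD c.2 0 + 1)) := by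
        simp only [stepPar, h]; rfl
      simp only [List.foldl_cons, hs, List.filter_cons, h, Bool.not_false, List.map_cons,
        List.foldl_cons, ih]
      rfl

-- every flattened cell has parity 0 or 1 (indices start at a nonnegative row index)
lemma cells_parity (rows : List (List String)) (i : Int) (hi : 0 ≤ i) :
    ∀ c ∈ cellsAt (PySem.List.enumerate rows i), c.1 = 0 ∨ c.1 = 1 := by
  intro c hc
  simp only [cellsAt, List.mem_flatMap, List.mem_map] at hc
  obtain ⟨p, hp, q, hq, rfl⟩ := hc
  rw [PySem.List.mem_enumerate_iff] at hp
  obtain ⟨k, hk, rfl⟩ := hp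
  rw [PySem.List.mem_enumerate_iff] at hq
  obtain ⟨k', hk', rfl⟩ := hq
  have hnn : (0 : Int) ≤ (i + k) + (0 + k') := by positivity
  rw [PySem.Int.mod_eq_emod_of_pos (by norm_num)]
  omega

lemma filterW (cs : List (Int × String)) (hpar : ∀ c ∈ cs, c.1 = 0 ∨ c.1 = 1) :
    cs.filter (fun c => !(c.1 == 0)) = cs.filter (fun c => c.1 == 1) := by
  apply List.filter_congr
  intro c hc
  rcases hpar c hc with h | h <;> rw [h] <;> rfl

lemma statsPos (g : List String) : ∀ p ∈ statsOf g, 1 ≤ p.2 := by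
  intro p hp
  simp only [statsOf, List.mem_map] at hp
  obtain ⟨c, hc, rfl⟩ := hp
  have : c ∈ g := (PySem.Set.mem_ofList g c).mp hc
  have := List.count_pos_iff.mpr this
  simp only []
  omega

-- first two of the stable descending sort = A's running best-two scan
lemma sorted_append_single (l : List (String × Int)) (x : String × Int) :
    PySem.List.sorted (l ++ [x]) (fun kv => -kv.2) false
      = PySem.List.insertBy (fun a b => decide (-a.2 < -b.2)) x
          (PySem.List.sorted l (fun kv => -kv.2) false) := by
  rw [PySem.List.sorted_eq_foldl_insertBy, PySem.List.sorted_eq_foldl_insertBy,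
    List.foldl_append, List.foldl_cons, List.foldl_nil]

lemma sortedTake2 : ∀ (l : List (String × Int)), (∀ p ∈ l, 1 ≤ p.2) →
    (PySem.List.sorted l (fun kv => -kv.2) false).take 2 = optList (solveScan l) := by
  intro l
  induction l using List.reverseRecOn with
  | nil => intro _; rfl
  | append_singleton l x ih =>
    intro hpos
    have hx : 1 ≤ x.2 := hpos x (by simp)
    have hl : ∀ p ∈ l, 1 ≤ p.2 := fun p hp => hpos p (by simp [hp])
    have hscan : solveScan (l ++ [x])
        = (fun m (kv : String × Int) =>
            if (m.1.map Prod.snd).getD (-1) < kv.2 then (some kv, m.1)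
            else if (m.2.map Prod.snd).getD (-1) < kv.2 then (m.1, some kv)
            else m) (solveScan l) x := by
      simp [solveScan, List.foldl_append]
    rw [sorted_append_single, hscan]
    have ihs := ih hl
    cases hs : PySem.List.sorted l (fun kv => -kv.2) false with
    | nil =>
      have hl0 : l = [] := (PySem.List.sorted_eq_nil_iff _ _ _).mp hs
      subst hl0
      have h1 : ((-1 : Int) < x.2) := by omega
      simp [solveScan, PySem.List.insertBy, optList, h1]
    | cons s0 tl =>
      rw [hs] at ihs
      rcases hsc : solveScan l with ⟨m1, m2⟩
      rw [hsc] at ihs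
      cases m1 with
      | none => simp [optList] at ihs
      | some a =>
        cases m2 with
        | none =>
          simp only [optList, List.take_succ_cons] at ihs
          have ha : a = s0 := by
            cases tl <;> simp_all
          have htl : tl = [] := by
            cases tl <;> simp_all
          subst ha; subst htl
          by_cases h1 : a.2 < x.2
          · have e1 : (decide (-x.2 < -a.2)) = true := by
              simp; omega
            simp [PySem.List.insertBy, e1, h1, optList]
          · have e1 : (decide (-x.2 < -a.2)) = false := by
              simp; omega
            have h2 : ((-1 : Int) < x.2) := by omega
            simp [PySem.List.insertBy, e1, h1, h2, optList]
        | some b2 =>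
          cases tl with
          | nil => simp [optList] at ihs
          | cons s1 tl2 =>
            simp only [optList, List.take_succ_cons, List.take_zero] at ihs
            have hab : s0 = a ∧ s1 = b2 := by
              simp only [optList, List.cons.injEq, and_true] at ihs
              exact ⟨ihs.1, ihs.2⟩
            have ha : a = s0 := hab.1.symm
            have hb : b2 = s1 := hab.2.symm
            subst ha; subst hb
            by_cases h1 : a.2 < x.2
            · have e1 : (decide (-x.2 < -a.2)) = true := by simp; omega
              simp [PySem.List.insertBy, e1, h1, optList]
            · have e1 : (decide (-x.2 < -a.2)) = false := by simp; omega
              by_cases h2 : b2.2 < x.2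
              · have e2 : (decide (-x.2 < -b2.2)) = true := by simp; omega
                simp [PySem.List.insertBy, e1, e2, h1, h2, optList]
              · have e2 : (decide (-x.2 < -b2.2)) = false := by simp; omega
                simp [PySem.List.insertBy, e1, e2, h1, h2, optList]

-- nonemptiness of a colour's char stream from Pre_solve's corresponding conjunct
lemma grp_ne (input : List (List String)) (pb : Int → Bool)
    (h : (PySem.List.enumerate input).any
        (fun p => (PySem.List.enumerate p.2).any
          (fun q => pb (PySem.Int.mod (p.1 + q.1) 2))) = true) :
    ((cellsB input).filter (fun c => pb c.1)).map (fun c => c.2) ≠ [] := by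
  simp only [List.any_eq_true] at h
  obtain ⟨p, hp, q, hq, hpq⟩ := h
  have hmem : (PySem.Int.mod (p.1 + q.1) 2, q.2) ∈ cellsB input := by
    simp only [cellsB, List.mem_flatMap, List.mem_map]
    exact ⟨p, hp, ⟨q, hq, rfl⟩⟩
  have hf : (PySem.Int.mod (p.1 + q.1) 2, q.2)
      ∈ (cellsB input).filter (fun c => pb c.1) := by
    rw [List.mem_filter]
    exact ⟨hmem, hpq⟩
  exact List.ne_nil_of_mem (List.mem_map_of_mem hf)

lemma stats_ne (g : List String) (h : g ≠ []) : statsOf g ≠ [] := by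
  rcases g with _ | ⟨c, t⟩
  · exact absurd rfl h
  · have : c ∈ PySem.Set.ofList (c :: t) := (PySem.Set.mem_ofList _ c).mpr (by simp)
    exact List.ne_nil_of_mem (List.mem_map_of_mem this)

-- scan of a nonempty stats list yields a first maximum, and the sort's take 2 mirrors it
lemma scan_shape (g : List String) (h : g ≠ []) :
    ∃ a m2, solveScan (statsOf g) = (some a, m2) := by
  rcases hsc : solveScan (statsOf g) with ⟨m1, m2⟩
  cases m1 with
  | some a => exact ⟨a, m2, rfl⟩
  | none =>
    have hst := sortedTake2 (statsOf g) (statsPos g)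
    rw [hsc] at hst
    simp only [optList] at hst
    have : PySem.List.sorted (statsOf g) (fun kv => -kv.2) false = [] := by
      rcases hs : PySem.List.sorted (statsOf g) (fun kv => -kv.2) false with _ | ⟨s0, tl⟩
      · rfl
      · rw [hs] at hst; simp at hst
    exact absurd ((PySem.List.sorted_eq_nil_iff _ _ _).mp this) (stats_ne g h)

-- row_size: the fold's running size is the last row's length
lemma foldl_len_last : ∀ (l : List (List String)) (a : Int),
    l.foldl (fun _ r => (r.length : Int)) a
      = (l.getLast?.map (fun r => (r.length : Int))).getD a := by
  intro l
  induction l with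
  | nil => intro a; rfl
  | cons r t ih =>
    intro a
    rcases t with _ | ⟨r2, t2⟩
    · rfl
    · rw [List.foldl_cons, ih]
      rfl

lemma enum_foldl_len (l : List (List String)) : ∀ (i : Int) (a : Int),
    (PySem.List.enumerate l i).foldl (fun _ p => (p.2.length : Int)) a
      = l.foldl (fun _ r => (r.length : Int)) a := by
  induction l with
  | nil => intro i a; rfl
  | cons r t ih =>
    intro i a
    rw [PySem.List.enumerate_cons]
    simp only [List.foldl_cons]
    exact ih (i + 1) _

lemma pyGet?_neg_one (l : List (List String)) (h : l ≠ []) :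
    PySem.List.pyGet? l (-1) = l.getLast? := by
  have hlen : 1 ≤ l.length := List.length_pos_iff.mpr h
  simp only [PySem.List.pyGet?, PySem.List.pyIdx?]
  rw [if_neg (by omega), if_pos (by omega)]
  simp only [Option.bind_some]
  rw [List.getLast?_eq_getElem?]
  norm_num

-- the grouping loop builds, in first-occurrence order, each char with its occurrence positions
lemma grpItems : ∀ (pairs : List (Int × String)),
    (pairs.foldl (fun d q => d.insert q.2 (d.getD q.2 [] ++ [q.1])) PySem.Dict.empty).items
      = (PySem.Set.ofList (pairs.map (fun q => q.2))).map
          (fun c => (c, (pairs.filter (fun q => q.2 == c)).map (fun q => q.1))) := by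
  intro pairs
  induction pairs using List.reverseRecOn with
  | nil => rfl
  | append_singleton l x ih =>
    rw [List.foldl_append, List.foldl_cons, List.foldl_nil]
    have hofl : PySem.Set.ofList ((l ++ [x]).map (fun q => q.2))
        = PySem.Set.add (PySem.Set.ofList (l.map (fun q => q.2))) x.2 := by
      rw [List.map_append, PySem.Set.ofList_eq_foldl, PySem.Set.ofList_eq_foldl,
        List.foldl_append]
      rfl
    have hkeys : (l.foldl (fun d q => d.insert q.2 (d.getD q.2 [] ++ [q.1]))
          PySem.Dict.empty).keys = PySem.Set.ofList (l.map (fun q => q.2)) := by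
      show ((l.foldl (fun d q => d.insert q.2 (d.getD q.2 [] ++ [q.1]))
          PySem.Dict.empty).items).map (fun p => p.1) = _
      rw [ih]
      simp only [List.map_map, Function.comp_def]
      exact List.map_id' _
    have hnodup : (l.foldl (fun d q => d.insert q.2 (d.getD q.2 [] ++ [q.1]))
          PySem.Dict.empty).keys.Nodup := by
      rw [hkeys]; exact PySem.Set.nodup_ofList _
    by_cases hm : x.2 ∈ PySem.Set.ofList (l.map (fun q => q.2))
    · have hcont : (l.foldl (fun d q => d.insert q.2 (d.getD q.2 [] ++ [q.1]))
            PySem.Dict.empty).contains x.2 = true := by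
        rw [PySem.Dict.contains_eq_decide_mem_keys, hkeys]
        exact decide_eq_true hm
      have hmemitem : (x.2, (l.filter (fun q => q.2 == x.2)).map (fun q => q.1))
          ∈ (l.foldl (fun d q => d.insert q.2 (d.getD q.2 [] ++ [q.1]))
              PySem.Dict.empty).items := by
        rw [ih]
        exact List.mem_map_of_mem hm
      have hgetD : (l.foldl (fun d q => d.insert q.2 (d.getD q.2 [] ++ [q.1]))
            PySem.Dict.empty).getD x.2 []
          = (l.filter (fun q => q.2 == x.2)).map (fun q => q.1) :=
        PySem.Dict.getD_of_mem_items _ hmemitem hnodup []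
      have haddeq : PySem.Set.add (PySem.Set.ofList (l.map (fun q => q.2))) x.2
          = PySem.Set.ofList (l.map (fun q => q.2)) := by
        have hc : PySem.Set.contains (PySem.Set.ofList (l.map (fun q => q.2))) x.2 = true := by
          simp only [PySem.Set.contains, List.contains_iff_mem]
          exact hm
        simp only [PySem.Set.add, hc]
        rfl
      rw [PySem.Dict.items_insert_of_contains _ _ hcont, ih, hgetD, hofl, haddeq,
        List.map_map]
      apply List.map_congr_left
      intro c hc
      by_cases hcx : c = x.2
      · subst hcx
        rw [List.filter_append]
        simp
      · have hne : (c == x.2) = false := by simp [hcx]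
        have hne' : (x.2 == c) = false := by
          simp only [beq_eq_false_iff_ne, ne_eq]
          exact fun h => hcx h.symm
        rw [List.filter_append]
        simp [hne, hne', hcx]
    · have hcont : (l.foldl (fun d q => d.insert q.2 (d.getD q.2 [] ++ [q.1]))
            PySem.Dict.empty).contains x.2 = false := by
        rw [PySem.Dict.contains_eq_decide_mem_keys, hkeys]
        exact decide_eq_false hm
      have hget : (l.foldl (fun d q => d.insert q.2 (d.getD q.2 [] ++ [q.1]))
            PySem.Dict.empty).get? x.2 = none := by
        rw [PySem.Dict.get?_eq_none_iff_not_mem_keys, hkeys]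
        exact hm
      have hgetD : (l.foldl (fun d q => d.insert q.2 (d.getD q.2 [] ++ [q.1]))
            PySem.Dict.empty).getD x.2 [] = [] := by
        rw [PySem.Dict.getD_eq_get?_getD, hget]
        rfl
      have hmemsnd : x.2 ∉ l.map (fun q => q.2) :=
        fun h => hm ((PySem.Set.mem_ofList _ _).mpr h)
      have hfilnil : l.filter (fun q => q.2 == x.2) = [] := by
        rw [List.filter_eq_nil_iff]
        intro q hq
        simp only [beq_iff_eq]
        exact fun h => hmemsnd (h ▸ List.mem_map_of_mem hq)
      have haddeq : PySem.Set.add (PySem.Set.ofList (l.map (fun q => q.2))) x.2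
          = PySem.Set.ofList (l.map (fun q => q.2)) ++ [x.2] := by
        have hc : PySem.Set.contains (PySem.Set.ofList (l.map (fun q => q.2))) x.2 = false := by
          simp only [PySem.Set.contains]
          rw [Bool.eq_false_iff]
          exact fun hct => hm (List.contains_iff_mem.mp hct)
        simp only [PySem.Set.add, hc]
        rfl
      rw [PySem.Dict.items_insert_of_not_contains _ _ hcont, ih, hgetD, hofl, haddeq,
        List.map_append]
      congr 1
      · apply List.map_congr_left
        intro c hc
        have hne : (x.2 == c) = false := by
          simp only [beq_eq_false_iff_ne, ne_eq]
          exact fun h => hm (h ▸ hc)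
        rw [List.filter_append]
        simp [hne]
      · simp only [List.map_cons, List.map_nil]
        rw [List.filter_append, hfilnil]
        simp

lemma ranking_eq (cells : List (Int × String)) (par : Int) :
    rankingB cells par
      = optList (solveScan (statsOf
          ((cells.filter (fun c => c.1 == par)).map (fun c => c.2)))) := by
  simp only [rankingB]
  have hstats : ((PySem.List.enumerate
          ((cells.filter (fun c => c.1 == par)).map (fun c => c.2))).foldl
        (fun d q => d.insert q.2 (d.getD q.2 [] ++ [q.1])) PySem.Dict.empty).items.map
        (fun ci => (ci.1, (ci.2.length : Int)))
      = statsOf ((cells.filter (fun c => c.1 == par)).map (fun c => c.2)) := by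
    rw [grpItems, List.map_map, PySem.List.map_snd_enumerate]
    unfold statsOf
    apply List.map_congr_left
    intro c hc
    simp only [Function.comp_apply]
    congr 1
    rw [List.length_map, ← List.countP_eq_length_filter]
    have h1 : List.count c
          (((cells.filter (fun c => c.1 == par)).map (fun c => c.2)))
        = List.countP (fun x => x == c)
            ((PySem.List.enumerate
              ((cells.filter (fun c => c.1 == par)).map (fun c => c.2))).map (fun q => q.2)) := by
      rw [PySem.List.map_snd_enumerate]
      rfl
    rw [h1, List.countP_map]
    rfl
  rw [hstats, sortedTake2 _ (statsPos _)]

-- ===== VERDICT (by name: the statement is the Claim_ definition above) =====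
theorem solve_spec : Claim_equal_solve := by
  intro input _hdom hpre
  unfold Spec_solve solve solve_alt
  -- the two colour streams of the flattened board
  have hF := foldRowM_eq_cells (PySem.List.enumerate input) PySem.Dict.empty PySem.Dict.empty 0
  have hS := splitPar (cellsAt (PySem.List.enumerate input)) PySem.Dict.empty PySem.Dict.empty
  have h1 : input.foldl stepRowA (PySem.Dict.empty, PySem.Dict.empty, true, 0)
      = (PySem.Dict.counter (((cellsB input).filter (fun c => c.1 == 0)).map (fun c => c.2)),
         PySem.Dict.counter (((cellsB input).filter (fun c => !(c.1 == 0))).map (fun c => c.2)),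
         (PySem.Int.mod (0 + input.length) 2 == 0),
         input.foldl (fun _ r => (r.length : Int)) 0) := by
    have h0 : (true : Bool) = (PySem.Int.mod (0 : Int) 2 == 0) := by decide
    rw [h0, outerAM, hF, hS]
    simp only [PySem.Dict.foldl_insert_getD_add_one_eq_counter, enum_foldl_len]
    rfl
  have hpar : ∀ c ∈ cellsB input, c.1 = 0 ∨ c.1 = 1 := cells_parity input 0 le_rfl
  have hWg : ((cellsB input).filter (fun c => !(c.1 == 0))).map (fun c => c.2)
      = ((cellsB input).filter (fun c => c.1 == 1)).map (fun c => c.2) := by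
    rw [filterW (cellsB input) hpar]
  have hg0 : ((cellsB input).filter (fun c => c.1 == (0 : Int))).map (fun c => c.2) ≠ [] :=
    grp_ne input (fun x => x == 0) hpre.1
  have hgW : ((cellsB input).filter (fun c => !(c.1 == (0 : Int)))).map (fun c => c.2) ≠ [] :=
    grp_ne input (fun x => !(x == 0)) hpre.2
  have hg1 : ((cellsB input).filter (fun c => c.1 == (1 : Int))).map (fun c => c.2) ≠ [] := by
    rw [← hWg]; exact hgW
  obtain ⟨b1, bm2, hb⟩ :=
    scan_shape (((cellsB input).filter (fun c => c.1 == (0 : Int))).map (fun c => c.2)) hg0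
  obtain ⟨w1, wm2, hw⟩ :=
    scan_shape (((cellsB input).filter (fun c => c.1 == (1 : Int))).map (fun c => c.2)) hg1
  have hitems0 : (PySem.Dict.counter
        (((cellsB input).filter (fun c => c.1 == (0 : Int))).map (fun c => c.2))).items
      = statsOf (((cellsB input).filter (fun c => c.1 == (0 : Int))).map (fun c => c.2)) := by
    rw [PySem.Dict.items_counter]; rfl
  have hitems1 : (PySem.Dict.counter
        (((cellsB input).filter (fun c => c.1 == (1 : Int))).map (fun c => c.2))).items
      = statsOf (((cellsB input).filter (fun c => c.1 == (1 : Int))).map (fun c => c.2)) := by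
    rw [PySem.Dict.items_counter]; rfl
  have hrb : rankingB (cellsB input) 0 = optList (some b1, bm2) :=
    (ranking_eq (cellsB input) 0).trans (by rw [hb])
  have hrw : rankingB (cellsB input) 1 = optList (some w1, wm2) :=
    (ranking_eq (cellsB input) 1).trans (by rw [hw])
  have hinput_ne : input ≠ [] := by
    rintro rfl
    exact hg0 rfl
  have hsz : input.foldl (fun _ r => (r.length : Int)) 0
      = (if input.isEmpty then 0
         else match PySem.List.pyGet? input (-1) with
              | some r => (r.length : Int)
              | none => 0) := by
    rw [foldl_len_last, pyGet?_neg_one input hinput_ne,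
      if_neg (by simp [List.isEmpty_iff, hinput_ne])]
    rcases hlast : input.getLast? with _ | r
    · exact absurd (List.getLast?_eq_none_iff.mp hlast) hinput_ne
    · rfl
  simp only [h1, hWg, hitems0, hitems1, hb, hw, hrb, hrw, ← hsz]
  rcases bm2 with _ | b2 <;> rcases wm2 with _ | w2 <;>
    simp only [optList, Option.map_some, Option.map_none, Option.getD_some, Option.getD_none] <;>
    split_ifs <;> simp_all
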